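-- pv_equiv track=rewrite | github.com/Mat52/pp1 | 13-Test3/p1.py | f
-- ===== SOURCE A (Python) =====
-- def f(n):
--     word = ""
--     if n < 1:
--         return ""
--     else:
--         for i in range(1, n+1):
--
--             if(i % 5 == 0):
--                 word += "/-"
--             else:
--                 word += "/"
--         if (word[-1] == "-"):
--             word = word[:-1]
--         return word
-- ===== SOURCE B (Python) =====
-- def f(n):
--     if n < 1:
--         return ""
--     full, rem = divmod(n, 5)
--     groups = ["/" * 5] * full
--     if rem:
--         groups.append("/" * rem)
--     return "-".join(groups)
-- ===== Notes on version B (the rewrite author's own statement) =====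
-- stated objective: faster
-- what changed: Replaces the per-character loop with its i%5 branch and the trailing-dash strip by arithmetic chunking: n//5 full groups plus a remainder group, joined with '-'.
import Mathlib
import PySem

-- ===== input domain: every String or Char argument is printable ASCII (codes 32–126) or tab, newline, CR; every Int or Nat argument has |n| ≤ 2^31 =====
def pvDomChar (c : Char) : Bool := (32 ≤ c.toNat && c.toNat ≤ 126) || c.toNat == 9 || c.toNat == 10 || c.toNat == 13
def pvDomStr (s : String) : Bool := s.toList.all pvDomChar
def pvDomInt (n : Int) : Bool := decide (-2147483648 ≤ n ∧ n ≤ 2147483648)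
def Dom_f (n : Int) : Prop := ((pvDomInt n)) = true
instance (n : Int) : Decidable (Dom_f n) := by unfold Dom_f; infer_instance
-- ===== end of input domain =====

-- B replaces A's per-character loop (with its i%5 branch and trailing-dash strip) by
-- arithmetic chunking: n//5 five-slash groups plus an n%5 remainder group, joined with "-".

-- ===== PORT A =====
-- Strings are ported at the code-point level (List Char accumulator, String.ofList at the end),
-- since Lean's own String.append is opaque to the kernel; the steps are A's steps.
def f (n : Int) : String :=
  if n < 1 then "" else
    let word : List Char :=
      (PySem.List.pyRange 1 (n+1) 1).foldl
        (fun w i => if PySem.Int.mod i 5 = 0 then w ++ ['/', '-'] else w ++ ['/']) []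
    let word := if PySem.List.pyGet? word (-1) = some '-'
                then PySem.List.slice word none (some (-1)) else word
    String.ofList word

-- ===== PORT B =====
def f_alt (n : Int) : String :=
  if n < 1 then "" else
    let full := PySem.Int.floordiv n 5
    let rem := PySem.Int.mod n 5
    let groups : List (List Char) := List.replicate full.toNat (List.replicate 5 '/')
    let groups := if rem ≠ 0 then groups ++ [List.replicate rem.toNat '/'] else groups
    String.ofList (PySem.Chars.join ['-'] groups)

-- ===== PRECONDITION & SPEC =====
def Spec_f (n : Int) (out : String) : Prop := out = f_alt n
instance (n : Int) (out : String) : Decidable (Spec_f n out) := by unfold Spec_f; infer_instance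

-- ===== CLAIM (what is proved, stated in full; the proofs are below) =====
def Claim_equal_f : Prop := ∀ (n : Int), Dom_f n → Spec_f n (f n)

-- ===== LEMMAS AND PROOFS =====

-- A's loop word after N iterations, as a recursion on N.
def pvW : Nat → List Char
  | 0 => []
  | (k+1) => pvW k ++ (if (k+1) % 5 = 0 then ['/', '-'] else ['/'])

-- The stripped result (no trailing dash), as a recursion on N.
def pvL : Nat → List Char
  | 0 => []
  | (k+1) => pvL k ++ (if (k+1) % 5 = 1 ∧ k ≠ 0 then ['-', '/'] else ['/'])

-- B's value as a function of N.
def pvAlt (N : Nat) : List Char :=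
  PySem.Chars.join ['-'] (List.replicate (N / 5) (List.replicate 5 '/')
    ++ if N % 5 ≠ 0 then [List.replicate (N % 5) '/'] else [])

lemma pv_loop_eq (N : Nat) :
    (PySem.List.pyRange 1 ((N:Int)+1) 1).foldl
      (fun w i => if PySem.Int.mod i 5 = 0 then w ++ ['/', '-'] else w ++ ['/']) [] = pvW N := by
  induction N with
  | zero => simp [PySem.List.pyRange_one_eq_nil, pvW]
  | succ k ih =>
    have h1 : (1:Int) ≤ (k:Int) + 1 := by omega
    have : ((k+1:Nat):Int) + 1 = ((k:Int)+1) + 1 := by push_cast; ring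
    rw [this, PySem.List.pyRange_one_succ_right h1, List.foldl_append, ih]
    have hmod : PySem.Int.mod ((k:Int)+1) 5 = 0 ↔ (k+1) % 5 = 0 := by
      have h5 : ((k:Int)+1) = ((k+1:Nat):Int) := by push_cast; ring
      rw [h5, PySem.Int.mod_eq_zero_iff_dvd]
      constructor
      · intro hd; omega
      · intro hd; omega
    simp only [List.foldl, pvW]
    by_cases h : (k+1) % 5 = 0
    · rw [if_pos (hmod.mpr h), if_pos h]
    · rw [if_neg (fun hc => h (hmod.mp hc)), if_neg h]

lemma pvW_eq (N : Nat) :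
    pvW N = pvL N ++ (if N % 5 = 0 ∧ N ≠ 0 then ['-'] else []) := by
  induction N with
  | zero => simp [pvW, pvL]
  | succ k ih =>
    simp only [pvW, pvL, ih]
    by_cases h0 : (k+1) % 5 = 0
    · have hk : ¬ (k % 5 = 0 ∧ k ≠ 0) := by omega
      have h1 : ¬ ((k+1) % 5 = 1 ∧ k ≠ 0) := by omega
      simp [h0, hk]
    · by_cases h1 : (k+1) % 5 = 1
      · by_cases hk0 : k = 0
        · subst hk0; simp [pvL]
        · have hk : k % 5 = 0 ∧ k ≠ 0 := by omega
          simp [h1, hk0, hk]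
      · have hk : ¬ (k % 5 = 0 ∧ k ≠ 0) := by omega
        simp [h0, h1, hk]

-- For N ≥ 1 the stripped word ends with '/'.
lemma pvL_ends (N : Nat) (h : N ≠ 0) : ∃ t, pvL N = t ++ ['/'] := by
  cases N with
  | zero => exact absurd rfl h
  | succ k =>
    simp only [pvL]
    by_cases hc : (k+1) % 5 = 1 ∧ k ≠ 0
    · exact ⟨pvL k ++ ['-'], by simp [hc]⟩
    · exact ⟨pvL k, by simp [hc]⟩

-- join over a snoc.
lemma pv_join_snoc (gs : List (List Char)) (t : List Char) :
    PySem.Chars.join ['-'] (gs ++ [t]) =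
      PySem.Chars.join ['-'] gs ++ (if gs = [] then [] else ['-']) ++ t := by
  induction gs with
  | nil => simp [PySem.Chars.join_nil, PySem.Chars.join_singleton]
  | cons a rest ih =>
    cases rest with
    | nil => simp [PySem.Chars.join_singleton, PySem.Chars.join_cons_cons]
    | cons b r =>
      rw [List.cons_append] at ih
      rw [List.cons_append, List.cons_append, PySem.Chars.join_cons_cons, ih,
        PySem.Chars.join_cons_cons]
      simp

lemma pvL_eq_alt (N : Nat) : pvL N = pvAlt N := by
  induction N with
  | zero => simp [pvL, pvAlt, PySem.Chars.join_nil]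
  | succ k ih =>
    rw [pvL, ih]
    by_cases h4 : k % 5 = 4
    · -- remainder 4 closes a group
      have hq : (k+1) / 5 = k / 5 + 1 := by omega
      have hm : (k+1) % 5 = 0 := by omega
      have h1 : ¬ ((k+1) % 5 = 1 ∧ k ≠ 0) := by omega
      have hrep : List.replicate (k/5+1) (List.replicate 5 '/')
          = List.replicate (k/5) (List.replicate 5 '/') ++ [List.replicate 5 '/'] :=
        List.replicate_succ'
      rw [if_neg h1, pvAlt, pvAlt, hq, hm, h4,
        if_neg (by omega : ¬ (0:Nat) ≠ 0), if_pos (by omega : (4:Nat) ≠ 0),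
        List.append_nil, hrep, pv_join_snoc, pv_join_snoc]
      simp [show List.replicate 5 '/' = List.replicate 4 '/' ++ ['/'] from by decide]
    · by_cases h0 : k % 5 = 0
      · -- start of a new group
        have hq : (k+1) / 5 = k / 5 := by omega
        have hm : (k+1) % 5 = 1 := by omega
        rw [pvAlt, pvAlt, hq, hm, h0, if_neg (by omega : ¬ (0:Nat) ≠ 0),
          if_pos (by omega : (1:Nat) ≠ 0), pv_join_snoc]
        by_cases hk0 : k = 0
        · subst hk0; simp
        · have hne : List.replicate (k/5) (List.replicate 5 '/') ≠ [] := by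
            simp [List.replicate_eq_nil_iff]; omega
          have h5 : ¬ k < 5 := by omega
          simp [hk0, h5]
      · -- remainder grows within the current group
        have hq : (k+1) / 5 = k / 5 := by omega
        have hm : (k+1) % 5 = k % 5 + 1 := by omega
        have h1 : ¬ ((k+1) % 5 = 1 ∧ k ≠ 0) := by omega
        rw [if_neg h1, pvAlt, pvAlt, hq, hm, if_pos (by omega : k % 5 ≠ 0),
          if_pos (by omega : k % 5 + 1 ≠ 0),
          (List.replicate_succ' : List.replicate (k % 5 + 1) '/' = _),
          pv_join_snoc, pv_join_snoc]
        simp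

lemma pv_f_eq (N : Nat) (h : N ≠ 0) : f ((N:Int)) = String.ofList (pvL N) := by
  have hlt : ¬ ((N:Int) < 1) := by omega
  rw [f, if_neg hlt, pv_loop_eq, pvW_eq]
  by_cases h0 : N % 5 = 0
  · simp only [if_pos (⟨h0, h⟩ : N % 5 = 0 ∧ N ≠ 0)]
    rw [if_pos (PySem.List.pyGet?_neg_one_append_singleton (pvL N) '-'),
      PySem.List.slice_to_neg_one]
    simp
  · have hc : ¬ (N % 5 = 0 ∧ N ≠ 0) := by tauto
    simp only [if_neg hc, List.append_nil]
    obtain ⟨t, ht⟩ := pvL_ends N h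
    rw [ht, if_neg (by rw [PySem.List.pyGet?_neg_one_append_singleton]; decide)]

lemma pv_falt_eq (N : Nat) (h : N ≠ 0) : f_alt ((N:Int)) = String.ofList (pvAlt N) := by
  have hlt : ¬ ((N:Int) < 1) := by omega
  have hfd : PySem.Int.floordiv ((N:Int)) 5 = ((N / 5 : Nat) : Int) := by
    simp only [PySem.Int.floordiv, Int.fdiv_eq_ediv]
    omega
  have hmd : PySem.Int.mod ((N:Int)) 5 = ((N % 5 : Nat) : Int) := by
    simp only [PySem.Int.mod, Int.fmod_eq_emod]
    omega
  rw [f_alt, if_neg hlt]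
  simp only [hfd, hmd, Int.toNat_natCast]
  rw [pvAlt]
  by_cases h0 : N % 5 = 0
  · rw [if_neg (show ¬ ((N % 5 : Nat) : Int) ≠ 0 by omega),
      if_neg (show ¬ N % 5 ≠ 0 by omega), List.append_nil]
  · rw [if_pos (show ((N % 5 : Nat) : Int) ≠ 0 by omega),
      if_pos (show N % 5 ≠ 0 from h0)]

-- ===== VERDICT (by name: the statement is the Claim_ definition above) =====
theorem f_spec : Claim_equal_f := by
  intro n _
  unfold Spec_f
  by_cases h : n < 1
  · rw [f, f_alt, if_pos h, if_pos h]
  · have hN : n = ((n.toNat : Nat) : Int) := by omega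
    have hne : n.toNat ≠ 0 := by omega
    rw [hN, pv_f_eq _ hne, pv_falt_eq _ hne, pvL_eq_alt]
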